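-- pv_equiv track=rewrite | github.com/Qward1/TrueHack | src/agents/runtime_state_verifier.py | _extract_inventory_paths
-- ===== SOURCE A (Python) =====
-- def _unique_strings(items: list[str]) -> list[str]:
--     seen: set[str] = set()
--     ordered: list[str] = []
--     for item in items:
--         normalized = str(item).strip()
--         if not normalized or normalized in seen:
--             continue
--         seen.add(normalized)
--         ordered.append(normalized)
--     return ordered
--
-- def _extract_inventory_paths(value: object) -> list[str]:
--     if not isinstance(value, list):
--         return []
--     paths: list[str] = []
--     for item in value:
--         if not isinstance(item, dict):
--             continue
--         path = str(item.get("path", "") or "").strip()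
--         if path:
--             paths.append(path)
--     return _unique_strings(paths)
-- ===== SOURCE B (Python) =====
-- def _extract_inventory_paths(value: object) -> list[str]:
--     if not isinstance(value, list):
--         return []
--     seen: set[str] = set()
--     ordered: list[str] = []
--     for item in value:
--         if not isinstance(item, dict):
--             continue
--         path = str(item.get("path", "") or "").strip()
--         if not path or path in seen:
--             continue
--         seen.add(path)
--         ordered.append(path)
--     return ordered
-- ===== Notes on version B (the rewrite author's own statement) =====
-- stated objective: simpler
-- what changed: Fuses A's two passes (build the stripped path list, then a separate dedup pass that re-strips every element) into one loop over the input that maintains a seen-set and the ordered result directly.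
import Mathlib
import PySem

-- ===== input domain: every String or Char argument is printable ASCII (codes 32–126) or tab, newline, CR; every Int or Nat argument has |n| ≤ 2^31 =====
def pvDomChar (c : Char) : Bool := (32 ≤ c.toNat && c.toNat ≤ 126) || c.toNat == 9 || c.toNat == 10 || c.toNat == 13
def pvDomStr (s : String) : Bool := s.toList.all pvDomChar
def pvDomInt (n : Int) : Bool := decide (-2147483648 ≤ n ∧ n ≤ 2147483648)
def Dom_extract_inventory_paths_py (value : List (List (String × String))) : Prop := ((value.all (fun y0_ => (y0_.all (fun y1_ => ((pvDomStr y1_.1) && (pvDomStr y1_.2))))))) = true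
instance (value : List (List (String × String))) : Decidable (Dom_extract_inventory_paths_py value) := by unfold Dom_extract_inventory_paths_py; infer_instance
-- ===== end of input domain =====

-- B fuses A's two passes (build path list, then dedup pass) into one loop; return values proved equal.

-- ===== PORT A =====
-- helper: Python _unique_strings (seen-set + ordered list over an items list)
def unique_strings_py (items : List String) : List String :=
  (items.foldl (fun (st : PySem.Set String × List String) item =>
      let normalized := PySem.Str.strip item
      if normalized = "" ∨ PySem.Set.contains st.1 normalized = true then st
      else (PySem.Set.add st.1 normalized, st.2 ++ [normalized]))
    (PySem.Set.empty, [])).2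

def extract_inventory_paths_py (value : List (List (String × String))) : List String :=
  unique_strings_py
    (value.foldl (fun paths item =>
        let path := PySem.Str.strip (PySem.Dict.getD (PySem.Dict.mk item) "path" "")
        if path ≠ "" then paths ++ [path] else paths)
      [])

-- ===== PORT B =====
def extract_inventory_paths_py_alt (value : List (List (String × String))) : List String :=
  (value.foldl (fun (st : PySem.Set String × List String) item =>
      let path := PySem.Str.strip (PySem.Dict.getD (PySem.Dict.mk item) "path" "")
      if path = "" ∨ PySem.Set.contains st.1 path = true then st
      else (PySem.Set.add st.1 path, st.2 ++ [path]))
    (PySem.Set.empty, [])).2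

-- ===== PRECONDITION & SPEC =====
def Spec_extract_inventory_paths_py (value : List (List (String × String))) (out : List String) : Prop := out = extract_inventory_paths_py_alt value
instance (value : List (List (String × String))) (out : List String) : Decidable (Spec_extract_inventory_paths_py value out) := by unfold Spec_extract_inventory_paths_py; infer_instance

-- ===== CLAIM (what is proved, stated in full; the proofs are below) =====
def Claim_equal_extract_inventory_paths_py : Prop := ∀ (value : List (List (String × String))), Dom_extract_inventory_paths_py value → Spec_extract_inventory_paths_py value (extract_inventory_paths_py value)

-- ===== LEMMAS AND PROOFS =====

-- dropWhile is idempotent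
theorem pv_dropWhile_idem {α : Type} (p : α → Bool) (xs : List α) :
    List.dropWhile p (List.dropWhile p xs) = List.dropWhile p xs := by
  induction xs with
  | nil => rfl
  | cons x t ih =>
    by_cases h : p x = true
    · simp [List.dropWhile_cons, h, ih]
    · simp [h]

-- head of dropWhile fails p
theorem pv_dropWhile_head {α : Type} (p : α → Bool) (xs : List α) (c : α) (t : List α)
    (h : List.dropWhile p xs = c :: t) : p c = false := by
  induction xs with
  | nil => simp at h
  | cons x s ih =>
    by_cases hx : p x = true
    · exact ih (by simpa [List.dropWhile_cons, hx] using h)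
    · rw [List.dropWhile_cons_of_neg hx] at h
      cases h
      simpa using hx

-- rstrip produces a prefix of its argument
theorem pv_rstrip_prefix (l : List Char) : PySem.Chars.rstrip l <+: l := by
  unfold PySem.Chars.rstrip
  have h : List.dropWhile PySem.Chars.isspace l.reverse <:+ l.reverse :=
    List.dropWhile_suffix _
  have := List.reverse_prefix.mpr (by simpa using h)
  simpa using this

-- stripping a stripped char list is a no-op
theorem pv_strip_idem (l : List Char) :
    PySem.Chars.strip (PySem.Chars.strip l) = PySem.Chars.strip l := by
  unfold PySem.Chars.strip
  set u := PySem.Chars.lstrip l with hu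
  have hls : PySem.Chars.lstrip (PySem.Chars.rstrip u) = PySem.Chars.rstrip u := by
    cases hr : PySem.Chars.rstrip u with
    | nil => rfl
    | cons c t =>
      have hpre : (c :: t) <+: u := hr ▸ pv_rstrip_prefix u
      obtain ⟨r, hrq⟩ := hpre
      have hc : PySem.Chars.isspace c = false := by
        have : List.dropWhile PySem.Chars.isspace l = c :: (t ++ r) := by
          simpa [PySem.Chars.lstrip] using hrq.symm
        exact pv_dropWhile_head _ _ _ _ this
      simp [PySem.Chars.lstrip, List.dropWhile_cons_of_neg, hc]
  rw [hls]
  simp [PySem.Chars.rstrip, pv_dropWhile_idem]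

theorem pv_str_strip_idem (s : String) :
    PySem.Str.strip (PySem.Str.strip s) = PySem.Str.strip s := by
  unfold PySem.Str.strip
  rw [String.toList_ofList]
  rw [pv_strip_idem]

-- the fold step of _unique_strings (A's dedup pass)
def pvUniqStep (st : PySem.Set String × List String) (item : String) :
    PySem.Set String × List String :=
  let normalized := PySem.Str.strip item
  if normalized = "" ∨ PySem.Set.contains st.1 normalized = true then st
  else (PySem.Set.add st.1 normalized, st.2 ++ [normalized])

-- the path extracted from one dict
def pvPathOf (item : List (String × String)) : String :=
  PySem.Str.strip (PySem.Dict.getD (PySem.Dict.mk item) "path" "")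

-- the fold step of B's fused loop
def pvStepB (st : PySem.Set String × List String) (item : List (String × String)) :
    PySem.Set String × List String :=
  let path := pvPathOf item
  if path = "" ∨ PySem.Set.contains st.1 path = true then st
  else (PySem.Set.add st.1 path, st.2 ++ [path])

-- B's step = A's dedup step on the extracted path (strip is idempotent)
theorem pv_step_eq (st : PySem.Set String × List String) (i : List (String × String)) :
    pvStepB st i = pvUniqStep st (pvPathOf i) := by
  simp only [pvStepB, pvUniqStep, pv_str_strip_idem, pvPathOf]

-- A's extraction loop builds exactly the filtered map of pvPathOf
theorem pv_extract_eq (value : List (List (String × String))) (acc : List String) :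
    value.foldl (fun paths item =>
        let path := PySem.Str.strip (PySem.Dict.getD (PySem.Dict.mk item) "path" "")
        if path ≠ "" then paths ++ [path] else paths) acc
    = acc ++ (value.map pvPathOf).filter (fun p => p ≠ "") := by
  induction value generalizing acc with
  | nil => simp
  | cons i v ih =>
    simp only [List.foldl_cons, List.map_cons, List.filter_cons, ih]
    by_cases hp : pvPathOf i = ""
    · have hp' : PySem.Str.strip (PySem.Dict.getD (PySem.Dict.mk i) "path" "") = "" := hp
      simp [hp', pvPathOf]
    · have hp' : PySem.Str.strip (PySem.Dict.getD (PySem.Dict.mk i) "path" "") ≠ "" := hp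
      simp [hp', pvPathOf]

-- fused loop (B) = A's dedup fold over the extracted path list, for any starting state
theorem pv_fused_eq (value : List (List (String × String)))
    (st : PySem.Set String × List String) :
    value.foldl pvStepB st
    = ((value.map pvPathOf).filter (fun p => p ≠ "")).foldl pvUniqStep st := by
  induction value generalizing st with
  | nil => rfl
  | cons i v ih =>
    simp only [List.foldl_cons, List.map_cons, List.filter_cons]
    by_cases hp : pvPathOf i = ""
    · have h1 : pvStepB st i = st := by simp [pvStepB, hp]
      simp [hp, h1, ih]
    · have hd : (decide (pvPathOf i ≠ "")) = true := by simpa using hp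
      rw [if_pos hd]
      rw [List.foldl_cons, ih, pv_step_eq]

-- ===== VERDICT (by name: the statement is the Claim_ definition above) =====
theorem extract_inventory_paths_py_spec : Claim_equal_extract_inventory_paths_py := by
  intro value _
  show extract_inventory_paths_py value = extract_inventory_paths_py_alt value
  unfold extract_inventory_paths_py extract_inventory_paths_py_alt unique_strings_py
  rw [pv_extract_eq]
  have hB : value.foldl (fun (st : PySem.Set String × List String) item =>
      let path := PySem.Str.strip (PySem.Dict.getD (PySem.Dict.mk item) "path" "")
      if path = "" ∨ PySem.Set.contains st.1 path = true then st
      else (PySem.Set.add st.1 path, st.2 ++ [path])) (PySem.Set.empty, [])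
      = value.foldl pvStepB (PySem.Set.empty, []) := rfl
  have hU : ∀ (items : List String) (st : PySem.Set String × List String),
      items.foldl (fun (st : PySem.Set String × List String) item =>
        let normalized := PySem.Str.strip item
        if normalized = "" ∨ PySem.Set.contains st.1 normalized = true then st
        else (PySem.Set.add st.1 normalized, st.2 ++ [normalized])) st
      = items.foldl pvUniqStep st := fun _ _ => rfl
  rw [hB, hU, pv_fused_eq, List.nil_append]
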